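-- pv_equiv track=rewrite | github.com/jcolinpatrick/kryptos | scripts/yar/e_yar_nonperiodic.py | progressive_vig_dec
-- ===== SOURCE A (Python) =====
-- AZ = "ABCDEFGHIJKLMNOPQRSTUVWXYZ"
--
-- def _idx(alpha: str):
--     """Build char->index lookup for an alphabet."""
--     return {c: i for i, c in enumerate(alpha)}
--
-- def progressive_vig_dec(ct: str, key: str, shift: int, alpha: str = AZ) -> str:
--     """Vigenere with key that shifts by `shift` positions each full cycle.
--     Cycle 0: key as-is. Cycle 1: each key char += shift. Etc."""
--     aidx = _idx(alpha)
--     n = len(alpha)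
--     klen = len(key)
--     kv = [aidx[c] for c in key]
--     pt = []
--     for i, c in enumerate(ct):
--         cycle = i // klen
--         k = (kv[i % klen] + cycle * shift) % n
--         pt.append(alpha[(aidx[c] - k) % n])
--     return "".join(pt)
-- ===== SOURCE B (Python) =====
-- AZ = "ABCDEFGHIJKLMNOPQRSTUVWXYZ"
--
-- def progressive_vig_dec(ct: str, key: str, shift: int, alpha: str = AZ) -> str:
--     """Cycle-chunked progressive Vigenere: walk the ciphertext a key-length
--     chunk at a time, bumping the running key values by `shift` after each
--     full cycle, instead of recomputing cycle = i // klen per character."""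
--     aidx = {c: i for i, c in enumerate(alpha)}
--     n = len(alpha)
--     kv = [aidx[c] for c in key]
--     out = []
--     rest = ct
--     while rest:
--         for k, c in zip(kv, rest):
--             out.append(alpha[(aidx[c] - k) % n])
--         kv = [k + shift for k in kv]
--         rest = rest[len(key):]
--     return "".join(out)
-- ===== Notes on version B (the rewrite author's own statement) =====
-- stated objective: alternative
-- what changed: Replaces the flat per-character loop that recomputes cycle = i // klen and i % klen for every index with an outer loop over key-length chunks that keeps a running key-value list bumped by shift once per cycle, pairing each chunk with the key via zip; no per-character division or modulus of the index remains.
import Mathlib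
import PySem

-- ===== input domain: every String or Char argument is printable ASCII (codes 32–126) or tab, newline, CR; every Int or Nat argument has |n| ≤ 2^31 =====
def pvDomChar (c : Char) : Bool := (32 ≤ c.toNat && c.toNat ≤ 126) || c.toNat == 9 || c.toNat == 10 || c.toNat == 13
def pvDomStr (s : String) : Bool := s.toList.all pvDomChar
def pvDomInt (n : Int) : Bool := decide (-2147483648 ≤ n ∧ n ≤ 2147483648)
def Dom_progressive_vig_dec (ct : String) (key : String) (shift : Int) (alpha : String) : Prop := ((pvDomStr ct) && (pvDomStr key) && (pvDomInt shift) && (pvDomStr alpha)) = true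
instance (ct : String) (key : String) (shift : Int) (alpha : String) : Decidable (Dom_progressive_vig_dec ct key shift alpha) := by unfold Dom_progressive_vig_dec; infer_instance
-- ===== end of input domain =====

-- B replaces A's flat per-character loop (cycle = i // klen, i % klen each step) with an
-- outer loop over key-length chunks keeping a running key-value list bumped by shift per cycle
-- (objective: alternative decomposition, same cost).


-- ===== PORT A =====
-- _idx(alpha): {c: i for i, c in enumerate(alpha)}
def pvAidx (alpha : List Char) : PySem.Dict Char Int :=
  (PySem.List.enumerate alpha).foldl (fun d ic => d.insert ic.2 ic.1) PySem.Dict.empty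

-- alpha[(aidx[c] - k) % n]   (shared subexpression of both Pythons, verbatim in each)
def pvDecChar (alpha : String) (aidx : PySem.Dict Char Int) (n : Int) (k : Int) (c : Char) : Char :=
  (PySem.Str.pyGet? alpha (PySem.Int.mod (aidx.getD c 0 - k) n)).getD ' '

def progressive_vig_dec (ct : String) (key : String) (shift : Int) (alpha : String) : String :=
  let aidx := pvAidx alpha.toList
  let n : Int := PySem.Str.len alpha
  let klen : Int := PySem.Str.len key
  let kv : List Int := key.toList.map (fun c => aidx.getD c 0)
  let pt : List Char := (PySem.List.enumerate ct.toList).foldl (fun acc ic =>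
    acc ++ [pvDecChar alpha aidx n
      (PySem.Int.mod (PySem.List.pyGetD kv (PySem.Int.mod ic.1 klen) 0
        + PySem.Int.floordiv ic.1 klen * shift) n) ic.2]) []
  String.ofList pt

-- ===== PORT B =====
-- the while loop of Source B: consume `rest` a chunk of len(key) at a time, bumping kv by shift per cycle
def pvAltGo (alpha : String) (aidx : PySem.Dict Char Int) (n : Int) (shift : Int)
    (kv : List Int) (rest : List Char) : List Char :=
  if h : kv = [] ∨ rest = [] then []
  else
    List.zipWith (fun k c => pvDecChar alpha aidx n k c) kv (rest.take kv.length)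
      ++ pvAltGo alpha aidx n shift (kv.map (· + shift)) (rest.drop kv.length)
termination_by rest.length
decreasing_by
  push Not at h
  have h1 : 0 < kv.length := List.length_pos_iff.mpr h.1
  have h2 : 0 < rest.length := List.length_pos_iff.mpr h.2
  simp only [List.length_drop]; omega

def progressive_vig_dec_alt (ct : String) (key : String) (shift : Int) (alpha : String) : String :=
  let aidx := pvAidx alpha.toList
  let n : Int := PySem.Str.len alpha
  let kv : List Int := key.toList.map (fun c => aidx.getD c 0)
  String.ofList (pvAltGo alpha aidx n shift kv ct.toList)

-- ===== PRECONDITION & SPEC =====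
-- Pre_ excludes exactly the inputs where A raises: a ct or key character not in alpha (KeyError),
-- and an empty key with non-empty ct (ZeroDivisionError; Python B loops forever there).
def Pre_progressive_vig_dec (ct : String) (key : String) (shift : Int) (alpha : String) : Prop :=
  (ct.toList = [] ∨ key.toList ≠ []) ∧
  ct.toList.all (fun c => alpha.toList.contains c) = true ∧
  key.toList.all (fun c => alpha.toList.contains c) = true
instance (ct : String) (key : String) (shift : Int) (alpha : String) : Decidable (Pre_progressive_vig_dec ct key shift alpha) := by unfold Pre_progressive_vig_dec; infer_instance

def pvWitness_progressive_vig_dec : String × String × Int × String := ("CAB", "AB", 1, "ABC")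

def Spec_progressive_vig_dec (ct : String) (key : String) (shift : Int) (alpha : String) (out : String) : Prop := out = progressive_vig_dec_alt ct key shift alpha
instance (ct : String) (key : String) (shift : Int) (alpha : String) (out : String) : Decidable (Spec_progressive_vig_dec ct key shift alpha out) := by unfold Spec_progressive_vig_dec; infer_instance

-- ===== CLAIM (what is proved, stated in full; the proofs are below) =====
def Claim_equal_progressive_vig_dec : Prop := ∀ (ct : String) (key : String) (shift : Int) (alpha : String), Dom_progressive_vig_dec ct key shift alpha → Pre_progressive_vig_dec ct key shift alpha → Spec_progressive_vig_dec ct key shift alpha (progressive_vig_dec ct key shift alpha)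

-- ===== LEMMAS AND PROOFS =====

-- (a - b % n) % n = (a - b) % n for positive n (floor-mod = emod there)
lemma pv_mod_sub_mod (a b n : Int) (hn : 0 < n) :
    PySem.Int.mod (a - PySem.Int.mod b n) n = PySem.Int.mod (a - b) n := by
  rw [PySem.Int.mod_eq_emod_of_pos hn, PySem.Int.mod_eq_emod_of_pos hn,
      PySem.Int.mod_eq_emod_of_pos hn,
      Int.sub_emod a (b % n) n, Int.emod_emod_of_dvd b (dvd_refl n), ← Int.sub_emod]

lemma pv_enumerate_append {α : Type} (l1 l2 : List α) (s : Int) :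
    PySem.List.enumerate (l1 ++ l2) s
      = PySem.List.enumerate l1 s ++ PySem.List.enumerate l2 (s + l1.length) := by
  induction l1 generalizing s with
  | nil => simp [PySem.List.enumerate_nil]
  | cons x xs ih =>
      simp only [List.cons_append, PySem.List.enumerate_cons, ih, List.length_cons]
      push_cast
      ring_nf

lemma pv_enumerate_getElem {α : Type} (l : List α) (s : Int) (j : Nat) (h' : j < l.length) :
    (PySem.List.enumerate l s)[j]'(by simpa [PySem.List.length_enumerate] using h')
      = (s + j, l[j]) := by
  induction l generalizing s j with
  | nil => simp at h'
  | cons x xs ih =>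
      cases j with
      | zero => simp [PySem.List.enumerate_cons]
      | succ j =>
          simp only [PySem.List.enumerate_cons, List.getElem_cons_succ]
          rw [ih _ _ (Nat.lt_of_succ_lt_succ h')]
          push_cast; ring_nf

-- one chunk: zipWith over the shifted key values = A's per-index map over the chunk
lemma pv_chunk_eq (alpha : String) (aidx : PySem.Dict Char Int) (shift n : Int)
    (kv0 : List Int) (hn : 0 < n) (hk : kv0 ≠ [])
    (chunk : List Char) (c0 : Nat) (hc : chunk.length ≤ kv0.length) :
    List.zipWith (fun k c => pvDecChar alpha aidx n k c)
        (kv0.map (fun x => x + (c0 : Int) * shift)) chunk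
      = (PySem.List.enumerate chunk ((c0 : Int) * (kv0.length : Int))).map (fun ic =>
          pvDecChar alpha aidx n
            (PySem.Int.mod (PySem.List.pyGetD kv0 (PySem.Int.mod ic.1 (kv0.length : Int)) 0
              + PySem.Int.floordiv ic.1 (kv0.length : Int) * shift) n) ic.2) := by
  have hklen : (0 : Int) < (kv0.length : Int) := by
    exact_mod_cast List.length_pos_iff.mpr hk
  apply List.ext_getElem
  · simp [PySem.List.length_enumerate, hc]
  · intro j hj hj'
    have hjc : j < chunk.length := by
      simpa [PySem.List.length_enumerate] using hj'
    have hjk : j < kv0.length := lt_of_lt_of_le hjc hc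
    rw [List.getElem_zipWith, List.getElem_map, List.getElem_map,
        pv_enumerate_getElem chunk _ j hjc]
    have hidx : PySem.Int.mod ((c0 : Int) * (kv0.length : Int) + (j : Int)) (kv0.length : Int)
        = (j : Int) := by
      rw [PySem.Int.mod_eq_emod_of_pos hklen, add_comm, Int.add_mul_emod_self_right _ _ _]
      exact Int.emod_eq_of_lt (by positivity) (by exact_mod_cast hjk)
    have hdiv : PySem.Int.floordiv ((c0 : Int) * (kv0.length : Int) + (j : Int)) (kv0.length : Int)
        = (c0 : Int) := by
      rw [PySem.Int.floordiv_eq_ediv_of_pos hklen, add_comm,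
          Int.add_mul_ediv_right _ _ (ne_of_gt hklen),
          Int.ediv_eq_zero_of_lt (by positivity) (by exact_mod_cast hjk), zero_add]
    simp only [hidx, hdiv, PySem.List.pyGetD_natCast, List.getD_eq_getElem _ _ hjk]
    simp only [pvDecChar]
    rw [pv_mod_sub_mod _ _ _ hn]

-- the main invariant: pvAltGo on kv0 shifted c0 times computes A's per-index map on the suffix
lemma pv_altGo_eq (alpha : String) (aidx : PySem.Dict Char Int) (shift : Int)
    (kv0 : List Int) (n : Int) (hk : kv0 ≠ []) (hn : 0 < n) :
    ∀ (m : Nat) (rest : List Char) (c0 : Nat), rest.length ≤ m →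
      pvAltGo alpha aidx n shift (kv0.map (fun x => x + (c0 : Int) * shift)) rest
        = (PySem.List.enumerate rest ((c0 : Int) * (kv0.length : Int))).map (fun ic =>
            pvDecChar alpha aidx n
              (PySem.Int.mod (PySem.List.pyGetD kv0 (PySem.Int.mod ic.1 (kv0.length : Int)) 0
                + PySem.Int.floordiv ic.1 (kv0.length : Int) * shift) n) ic.2) := by
  have hklen : 0 < kv0.length := List.length_pos_iff.mpr hk
  intro m
  induction m with
  | zero =>
      intro rest c0 hle
      have hnil : rest = [] := List.eq_nil_of_length_eq_zero (Nat.le_zero.mp hle)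
      subst hnil
      rw [pvAltGo]
      simp [PySem.List.enumerate_nil]
  | succ m ih =>
      intro rest c0 hle
      by_cases hrest : rest = []
      · subst hrest
        rw [pvAltGo]
        simp [PySem.List.enumerate_nil]
      · have hkv' : kv0.map (fun x => x + (c0 : Int) * shift) ≠ [] := by
          simpa using hk
        rw [pvAltGo]
        rw [dif_neg (by simp [hkv', hrest])]
        simp only [List.length_map]
        have hmapmap : (kv0.map (fun x => x + (c0 : Int) * shift)).map (· + shift)
            = kv0.map (fun x => x + ((c0 + 1 : Nat) : Int) * shift) := by
          rw [List.map_map]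
          apply List.map_congr_left
          intro x _
          simp only [Function.comp_apply]
          push_cast
          ring
        rw [hmapmap]
        conv_rhs => rw [← List.take_append_drop kv0.length rest]
        rw [pv_enumerate_append, List.map_append]
        have hdroplen : (rest.drop kv0.length).length ≤ m := by
          have h1 : 0 < rest.length := List.length_pos_iff.mpr hrest
          simp only [List.length_drop]
          omega
        rw [ih (rest.drop kv0.length) (c0 + 1) hdroplen]
        by_cases hsmall : rest.length ≤ kv0.length
        · have hdropnil : rest.drop kv0.length = [] := List.drop_eq_nil_of_le hsmall
          rw [hdropnil]
          simp only [PySem.List.enumerate_nil, List.map_nil, List.append_nil]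
          exact pv_chunk_eq alpha aidx shift n kv0 hn hk _ c0
            (by simp only [List.length_take]; omega)
        · have htakelen : ((rest.take kv0.length).length : Int) = (kv0.length : Int) := by
            simp only [List.length_take]; push_cast; omega
          rw [htakelen]
          have hstart : (c0 : Int) * (kv0.length : Int) + (kv0.length : Int)
              = ((c0 + 1 : Nat) : Int) * (kv0.length : Int) := by push_cast; ring
          rw [hstart]
          congr 1
          exact pv_chunk_eq alpha aidx shift n kv0 hn hk _ c0
            (by simp only [List.length_take]; omega)

theorem progressive_vig_dec_spec : Claim_equal_progressive_vig_dec := by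
  intro ct key shift alpha _ hpre
  obtain ⟨hck, hctmem, hkeymem⟩ := hpre
  unfold Spec_progressive_vig_dec progressive_vig_dec progressive_vig_dec_alt
  dsimp only
  rw [PySem.List.foldl_append_singleton_eq_map, List.nil_append]
  by_cases hct : ct.toList = []
  · rw [hct, pvAltGo]
    simp [PySem.List.enumerate_nil]
  · have hkey : key.toList ≠ [] := by tauto
    have hk : key.toList.map (fun c => (pvAidx alpha.toList).getD c 0) ≠ [] := by
      simpa using hkey
    have halpha : alpha.toList ≠ [] := by
      obtain ⟨c, hc⟩ := List.exists_mem_of_ne_nil ct.toList hct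
      rw [List.all_eq_true] at hctmem
      exact List.ne_nil_of_mem (by simpa using hctmem c hc)
    have hn : 0 < PySem.Str.len alpha := by
      rw [PySem.Str.len_eq]
      exact_mod_cast List.length_pos_iff.mpr halpha
    have hklen : PySem.Str.len key
        = ((key.toList.map (fun c => (pvAidx alpha.toList).getD c 0)).length : Int) := by
      rw [PySem.Str.len_eq, List.length_map]
    rw [hklen]
    have h0 : key.toList.map (fun c => (pvAidx alpha.toList).getD c 0)
        = (key.toList.map (fun c => (pvAidx alpha.toList).getD c 0)).map
            (fun x => x + ((0 : Nat) : Int) * shift) := by simp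
    conv_rhs => rw [h0]
    rw [pv_altGo_eq alpha (pvAidx alpha.toList) shift _ _ hk hn ct.toList.length ct.toList 0
        le_rfl]
    norm_num
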